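-- pv_equiv track=rewrite | github.com/bayhiker/python-algorithms | algorithms/dynamic_programming/backpack.py | backpack_iv_dp
-- ===== SOURCE A (Python) =====
-- from typing import List
--
-- def backpack_iv_dp(nums: List[int], target: int) -> int:
--     n = len(nums)
--     if n == 0:
--         return 0
--     dp = [[0 for j in range(target + 1)] for i in range(n)]
--     for i in range(n):
--         for j in range(1, target + 1):
--             for k in range(j // nums[i] + 1):
--                 if k * nums[i] == j:
--                     dp[i][j] += 1
--                 else:
--                     dp[i][j] = dp[i][j] + dp[i - 1][j - k * nums[i]]
--     return dp[n - 1][target]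
-- ===== SOURCE B (Python) =====
-- from typing import List
--
--
-- def backpack_iv_dp(nums: List[int], target: int) -> int:
--     # 1D unbounded-knapsack table: ways[t] = number of combinations summing to t.
--     if target <= 0:
--         return 0
--     ways = [1] + [0] * target
--     for num in nums:
--         for total in range(num, target + 1):
--             ways[total] += ways[total - num]
--     return ways[target]
-- ===== Notes on version B (the rewrite author's own statement) =====
-- stated objective: alternative
-- what changed: Replaces A's n-by-(target+1) 2D table with its inner loop over every multiple k*nums[i] (O(n*target^2) work) by the classic 1D unbounded-knapsack recurrence ways[t] += ways[t-num], one pass per item (O(n*target)); Pre_ excludes non-positive items with positive target (A raises ZeroDivisionError on a 0 item; on a negative item A returns a restart artefact while B's plain DP loop raises IndexError) and negative targets with non-empty lists (A raises IndexError), so a timing run's mixed-sign inputs fall outside the claim and no measured speed-up is asserted.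
-- intended difference: On a single-item list [a] with a > 0, a dividing target and target >= 2a, A's dp[-1] negative-index wraparound makes row 0 feed on its own partial values and A returns 2^(target/a - 1); B returns 1, the unique combination (target/a copies of a), which is the intended count. — e.g. on backpack_iv_dp([2], 4): A returns 2, B returns 1
-- outside the precondition, e.g. on backpack_iv_dp([-1, 2], 4): A returns 1, B raises IndexError; on backpack_iv_dp([2], -1): A raises IndexError, B returns 0; on backpack_iv_dp([0], 3): A raises ZeroDivisionError, B returns 0
import Mathlib
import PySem

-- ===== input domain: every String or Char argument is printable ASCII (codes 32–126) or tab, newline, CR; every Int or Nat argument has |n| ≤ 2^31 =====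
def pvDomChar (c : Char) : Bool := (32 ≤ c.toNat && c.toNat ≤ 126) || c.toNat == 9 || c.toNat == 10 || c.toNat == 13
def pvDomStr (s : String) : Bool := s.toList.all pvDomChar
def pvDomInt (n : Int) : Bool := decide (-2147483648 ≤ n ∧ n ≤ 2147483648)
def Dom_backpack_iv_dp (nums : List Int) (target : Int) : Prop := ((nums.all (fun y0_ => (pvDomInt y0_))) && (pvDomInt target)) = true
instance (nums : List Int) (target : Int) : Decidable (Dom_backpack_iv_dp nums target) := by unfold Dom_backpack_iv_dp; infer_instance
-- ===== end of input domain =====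

-- B replaces A's 2D table with its triple loop over multiples k*nums[i] by the classic 1D
-- unbounded-knapsack recurrence ways[t] += ways[t-num], one pass per item; on single-item lists
-- where A's dp[-1] wraparound makes row 0 feed on itself, B returns the intended count (see D_).

-- ===== PORT A =====
def backpack_iv_dp (nums : List Int) (target : Int) : Int :=
  let n := nums.length
  if n = 0 then 0
  else
    let dp0 : List (List Int) := List.replicate n (List.replicate (target + 1).toNat 0)
    let dp := (List.range n).foldl (fun dp (i : Nat) =>
      (PySem.List.pyRange 1 (target + 1) 1).foldl (fun dp j =>
        (PySem.List.pyRange 0 (PySem.Int.floordiv j (PySem.List.pyGetD nums (i : Int) 0) + 1) 1).foldl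
          (fun dp k =>
            let num := PySem.List.pyGetD nums (i : Int) 0
            let row := PySem.List.pyGetD dp (i : Int) []
            let cur := PySem.List.pyGetD row j 0
            let v := if k * num = j then cur + 1
                     else cur + PySem.List.pyGetD (PySem.List.pyGetD dp ((i : Int) - 1) []) (j - k * num) 0
            PySem.List.pySetD dp (i : Int) (PySem.List.pySetD row j v)) dp) dp) dp0
    PySem.List.pyGetD (PySem.List.pyGetD dp ((n : Int) - 1) []) target 0

-- ===== PORT B =====
def backpack_iv_dp_alt (nums : List Int) (target : Int) : Int :=
  if target ≤ 0 then 0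
  else
    let ways := nums.foldl (fun ways num =>
      (PySem.List.pyRange num (target + 1) 1).foldl (fun ways total =>
        PySem.List.pySetD ways total
          (PySem.List.pyGetD ways total 0 + PySem.List.pyGetD ways (total - num) 0)) ways)
      (1 :: List.replicate target.toNat 0)
    PySem.List.pyGetD ways target 0

-- ===== PRECONDITION & SPEC =====
-- Pre_ excludes the inputs where one of the programs raises: a negative target with a non-empty
-- list (A: IndexError on the empty dp row) and a non-positive item with positive target (A raises
-- ZeroDivisionError on a 0 item; on a negative item A returns a restart artefact while B's plain
-- 1D DP loop raises IndexError at index target - num > target).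
def Pre_backpack_iv_dp (nums : List Int) (target : Int) : Prop :=
  (nums = [] ∨ 0 ≤ target) ∧ (target ≤ 0 ∨ ∀ x ∈ nums, 0 < x)
instance (nums : List Int) (target : Int) : Decidable (Pre_backpack_iv_dp nums target) := by
  unfold Pre_backpack_iv_dp; infer_instance
def pvWitness_backpack_iv_dp : List Int × Int := ([2, 3], 6)

-- On a single-item list [a] with 0 < a, a ∣ target and 2a ≤ target, A's dp[-1] negative-index
-- wraparound makes row 0 read its own partial values and A returns 2^(target/a - 1); B returns 1,
-- the unique combination (target/a copies of a), which is the intended count.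
def D_backpack_iv_dp (nums : List Int) (target : Int) : Prop :=
  nums.length = 1 ∧ 0 < nums.headI ∧ nums.headI ∣ target ∧ 2 * nums.headI ≤ target
instance (nums : List Int) (target : Int) : Decidable (D_backpack_iv_dp nums target) := by
  unfold D_backpack_iv_dp; infer_instance

def Spec_backpack_iv_dp (nums : List Int) (target : Int) (out : Int) : Prop :=
  ¬ D_backpack_iv_dp nums target → out = backpack_iv_dp_alt nums target
instance (nums : List Int) (target : Int) (out : Int) : Decidable (Spec_backpack_iv_dp nums target out) := by
  unfold Spec_backpack_iv_dp; infer_instance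

def pvDiffWitness_backpack_iv_dp : List Int × Int := ([2], 4)
def pvDiffWitnessOut_backpack_iv_dp : Int × Int := (2, 1)

-- ===== CLAIM (what is proved, stated in full; the proofs are below) =====
def Claim_unchanged_backpack_iv_dp : Prop := ∀ (nums : List Int) (target : Int), Dom_backpack_iv_dp nums target → Pre_backpack_iv_dp nums target → Spec_backpack_iv_dp nums target (backpack_iv_dp nums target)
def Claim_changed_backpack_iv_dp : Prop := Dom_backpack_iv_dp (pvDiffWitness_backpack_iv_dp.1) (pvDiffWitness_backpack_iv_dp.2) ∧ Pre_backpack_iv_dp (pvDiffWitness_backpack_iv_dp.1) (pvDiffWitness_backpack_iv_dp.2) ∧ D_backpack_iv_dp (pvDiffWitness_backpack_iv_dp.1) (pvDiffWitness_backpack_iv_dp.2) ∧ backpack_iv_dp (pvDiffWitness_backpack_iv_dp.1) (pvDiffWitness_backpack_iv_dp.2) = pvDiffWitnessOut_backpack_iv_dp.1 ∧ backpack_iv_dp_alt (pvDiffWitness_backpack_iv_dp.1) (pvDiffWitness_backpack_iv_dp.2) = pvDiffWitnessOut_backpack_iv_dp.2 ∧ pvDiffWitnessOut_backpack_iv_dp.1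 ≠ pvDiffWitnessOut_backpack_iv_dp.2
def Claim_exact_backpack_iv_dp : Prop := ∀ (nums : List Int) (target : Int), Dom_backpack_iv_dp nums target → Pre_backpack_iv_dp nums target → D_backpack_iv_dp nums target → backpack_iv_dp nums target ≠ backpack_iv_dp_alt nums target
-- ===== LEMMAS AND PROOFS =====

-- ---------- generic list helpers ----------
theorem pv_getD_set {α : Type} (xs : List α) (n m : Nat) (v d : α) :
    (xs.set n v).getD m d = if n = m ∧ n < xs.length then v else xs.getD m d := by
  simp only [List.getD_eq_getElem?_getD, List.getElem?_set]
  split_ifs with h1 h2 <;> simp_all <;> omega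

theorem pv_pyGetD_toNat {α : Type} [Inhabited α] (xs : List α) (j : Int) (hj : 0 ≤ j) (d : α) :
    PySem.List.pyGetD xs j d = xs.getD j.toNat d := by
  have h : j = ((j.toNat : Nat) : Int) := by omega
  rw [h, PySem.List.pyGetD_natCast]
  have h2 : ((((j.toNat : Nat) : Int)).toNat) = j.toNat := by omega
  rw [h2]

theorem pv_pySetD_toNat {α : Type} (xs : List α) (i : Int) (v : α) (h : 0 ≤ i) :
    PySem.List.pySetD xs i v = xs.set i.toNat v := by
  have h2 : i = ((i.toNat : Nat) : Int) := by omega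
  rw [h2, PySem.List.pySetD_natCast]
  have h3 : (((i.toNat : Nat) : Int)).toNat = i.toNat := by omega
  rw [h3]

theorem pv_foldl_id {α β : Type} (l : List β) (f : α → β → α) (s : α)
    (h : ∀ s' x, x ∈ l → f s' x = s') : l.foldl f s = s := by
  induction l generalizing s with
  | nil => rfl
  | cons x xs ih =>
    rw [List.foldl_cons, h s x (by simp)]
    exact ih s (fun s' y hy => h s' y (by simp [hy]))

theorem pv_card_le_sum (l : List Int) (h : ∀ x ∈ l, 1 ≤ x) : (l.length : Int) ≤ l.sum := by
  induction l with
  | nil => simp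
  | cons x xs ih =>
    have := h x (by simp)
    have := ih (fun y hy => h y (by simp [hy]))
    simp only [List.length_cons, List.sum_cons]
    push_cast
    omega

-- ---------- the common reference: 1D unbounded-knapsack table as a function ----------
def pvInit : Nat → Int := fun j => if j = 0 then 1 else 0

def pvStep (a : Nat) (C : Nat → Int) (j : Nat) : Int :=
  if h : 0 < a ∧ a ≤ j then C j + pvStep a C (j - a) else C j
termination_by j
decreasing_by omega

def pvUpd (x : Int) (C : Nat → Int) : Nat → Int :=
  if 0 < x then pvStep x.toNat C else pvInit

def pvRef (nums : List Int) : Nat → Int := nums.foldl (fun C x => pvUpd x C) pvInit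

theorem pvStep_of_lt (a : Nat) (C : Nat → Int) (j : Nat) (h : j < a) : pvStep a C j = C j := by
  rw [pvStep]; split_ifs with h1
  · omega
  · rfl

theorem pvStep_of_le (a : Nat) (C : Nat → Int) (j : Nat) (ha : 0 < a) (h : a ≤ j) :
    pvStep a C j = C j + pvStep a C (j - a) := by
  rw [pvStep]; split_ifs with h1
  · rfl
  · omega

theorem pvStep_of_not (a : Nat) (C : Nat → Int) (j : Nat) (h : ¬ (0 < a ∧ a ≤ j)) :
    pvStep a C j = C j := by
  rw [pvStep, dif_neg h]

theorem pvStep_congr (a : Nat) (C C' : Nat → Int) (j : Nat) (h : ∀ i ≤ j, C i = C' i) :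
    pvStep a C j = pvStep a C' j := by
  induction j using Nat.strong_induction_on with
  | _ j ih =>
    by_cases h1 : 0 < a ∧ a ≤ j
    · rw [pvStep_of_le a C j h1.1 h1.2, pvStep_of_le a C' j h1.1 h1.2,
        h j le_rfl, ih (j - a) (by omega) (fun i hi => h i (by omega))]
    · rw [pvStep_of_not a C j h1, pvStep_of_not a C' j h1]
      exact h j le_rfl

theorem pvStep_init (a : Nat) (ha : 0 < a) (j : Nat) :
    pvStep a pvInit j = if j % a = 0 then 1 else 0 := by
  induction j using Nat.strong_induction_on with
  | _ j ih =>
    by_cases hj : j < a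
    · rw [pvStep_of_lt a _ j hj]
      simp only [pvInit]
      rw [Nat.mod_eq_of_lt hj]
    · rw [pvStep_of_le a _ j ha (by omega), ih (j - a) (by omega)]
      have hm : (j - a) % a = j % a := by
        conv_rhs => rw [show j = (j - a) + a by omega]
        rw [Nat.add_mod_right]
      have hj0 : j ≠ 0 := by omega
      simp only [pvInit, if_neg hj0, hm]
      omega

theorem pvRef_zero_aux (l : List Int) (C : Nat → Int) (h : C 0 = 1) :
    (l.foldl (fun C x => pvUpd x C) C) 0 = 1 := by
  induction l generalizing C with
  | nil => exact h
  | cons x xs ih =>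
    refine ih _ ?_
    by_cases hx : 0 < x
    · simp only [pvUpd, if_pos hx]
      rw [pvStep_of_lt _ _ _ (by omega)]
      exact h
    · simp only [pvUpd, if_neg hx]; rfl

theorem pvRef_zero (nums : List Int) : pvRef nums 0 = 1 :=
  pvRef_zero_aux nums pvInit rfl

theorem pvRef_append (p : List Int) (x : Int) :
    pvRef (p ++ [x]) = pvUpd x (pvRef p) := by
  simp [pvRef, List.foldl_append]

-- ---------- B side: the 1D table computes pvRef on all-positive item lists ----------
def pvBBody (target : Int) : List Int → Int → List Int := fun ways num =>
  (PySem.List.pyRange num (target + 1) 1).foldl (fun ways total =>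
    PySem.List.pySetD ways total
      (PySem.List.pyGetD ways total 0 + PySem.List.pyGetD ways (total - num) 0)) ways

theorem pvB_unfold (nums : List Int) (target : Int) :
    backpack_iv_dp_alt nums target =
      if target ≤ 0 then 0
      else PySem.List.pyGetD (nums.foldl (pvBBody target) (1 :: List.replicate target.toNat 0)) target 0 := rfl

theorem pvB_loop (a : Int) (ha : 0 < a) (T : Nat) (d : Nat) :
    ∀ (w : List Int), w.length = T + 1 → a + d ≤ (T : Int) + 1 →
      (((PySem.List.pyRange a (a + d) 1).foldl (fun ways total =>
          PySem.List.pySetD ways total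
            (PySem.List.pyGetD ways total 0 + PySem.List.pyGetD ways (total - a) 0)) w).length = T + 1 ∧
       ∀ m, m < T + 1 →
        ((PySem.List.pyRange a (a + d) 1).foldl (fun ways total =>
          PySem.List.pySetD ways total
            (PySem.List.pyGetD ways total 0 + PySem.List.pyGetD ways (total - a) 0)) w).getD m 0 =
          if (m : Int) < a + d then pvStep a.toNat (fun i => w.getD i 0) m else w.getD m 0) := by
  induction d with
  | zero =>
    intro w hw hbound
    rw [show a + (0:Nat) = a by simp, PySem.List.pyRange_one_eq_nil le_rfl]
    refine ⟨hw, fun m hm => ?_⟩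
    simp only [List.foldl_nil]
    split_ifs with hlt
    · simpa using (pvStep_of_lt a.toNat (fun i => w.getD i 0) m (by omega)).symm
    · rfl
  | succ d ih =>
    intro w hw hbound
    have hsplit : PySem.List.pyRange a (a + (d+1 : Nat)) 1 =
        PySem.List.pyRange a (a + d) 1 ++ [a + d] := by
      have : a + ((d:Nat)+1 : Nat) = (a + d) + 1 := by push_cast; ring
      rw [this]
      exact PySem.List.pyRange_one_succ_right (by omega)
    rw [hsplit, List.foldl_append]
    obtain ⟨hlen1, hpt1⟩ := ih w hw (by push_cast at hbound ⊢; omega)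
    set w1 := (PySem.List.pyRange a (a + d) 1).foldl (fun ways total =>
          PySem.List.pySetD ways total
            (PySem.List.pyGetD ways total 0 + PySem.List.pyGetD ways (total - a) 0)) w with hw1
    simp only [List.foldl_cons, List.foldl_nil]
    -- the single step at index j = a + d
    have hj0 : (0:Int) ≤ a + d := by omega
    have hjT : (a + (d:Int)).toNat < T + 1 := by push_cast at hbound; omega
    have hja : (0:Int) ≤ a + d - a := by omega
    have hda : ((a + (d:Int)) - a).toNat = d := by omega
    rw [pv_pySetD_toNat _ _ _ hj0,
        pv_pyGetD_toNat _ _ hj0, pv_pyGetD_toNat _ _ hja, hda]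
    have hvj : w1.getD (a + (d:Int)).toNat 0 = w.getD (a + (d:Int)).toNat 0 := by
      rw [hpt1 _ hjT]
      split_ifs with h1
      · exfalso; omega
      · rfl
    have hvd : w1.getD d 0 = pvStep a.toNat (fun i => w.getD i 0) d := by
      rw [hpt1 d (by omega), if_pos (show ((d:Nat):Int) < a + (d:Nat) by omega)]
    have harg : (a + (d:Int)).toNat - a.toNat = d := by omega
    have hstep : w.getD (a + (d:Int)).toNat 0 + pvStep a.toNat (fun i => w.getD i 0) d =
        pvStep a.toNat (fun i => w.getD i 0) (a + (d:Int)).toNat := by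
      rw [pvStep_of_le a.toNat (fun i => w.getD i 0) ((a + (d:Int)).toNat) (by omega) (by omega),
        harg]
    rw [hvj, hvd, hstep]
    constructor
    · rw [List.length_set]; exact hlen1
    · intro m hm
      rw [pv_getD_set, hlen1]
      by_cases hcase : (a + (d:Int)).toNat = m
      · rw [if_pos ⟨hcase, hjT⟩, hcase,
          if_pos (show (m:Int) < a + ((d:Nat)+1 : Nat) by push_cast; omega)]
      · rw [if_neg (fun hc => hcase hc.1), hpt1 m hm]
        by_cases h2 : (m:Int) < a + d
        · rw [if_pos h2, if_pos (by push_cast; omega)]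
        · rw [if_neg h2, if_neg (by push_cast at h2 ⊢; omega)]

theorem pvB_fold (target : Int) (rest : List Int) :
    ∀ (w : List Int) (C : Nat → Int), (∀ x ∈ rest, 0 < x) → w.length = target.toNat + 1 →
      (∀ m, m < target.toNat + 1 → w.getD m 0 = C m) →
      ((rest.foldl (pvBBody target) w).length = target.toNat + 1 ∧
       ∀ m, m < target.toNat + 1 →
        (rest.foldl (pvBBody target) w).getD m 0 = (rest.foldl (fun C x => pvUpd x C) C) m) := by
  induction rest with
  | nil => exact fun w C _ hw hpt => ⟨hw, fun m hm => by simpa using hpt m hm⟩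
  | cons x xs ih =>
    intro w C hpos hw hpt
    have hx : 0 < x := hpos x (by simp)
    have hposxs : ∀ y ∈ xs, 0 < y := fun y hy => hpos y (by simp [hy])
    simp only [List.foldl_cons]
    by_cases hxt : x ≤ target + 1
    · have hd : x + ((target + 1 - x).toNat : Int) = target + 1 := by omega
      obtain ⟨hlen1, hpt1⟩ := pvB_loop x hx target.toNat (target + 1 - x).toNat w hw
        (by rw [hd]; omega)
      rw [hd] at hlen1 hpt1
      refine ih _ (pvUpd x C) hposxs hlen1 (fun m hm => ?_)
      simp only [pvBBody]
      rw [hpt1 m hm, if_pos (by omega)]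
      simp only [pvUpd, if_pos hx]
      exact pvStep_congr x.toNat _ _ m (fun i hi => hpt i (by omega))
    · have hb : pvBBody target w x = w := by
        simp only [pvBBody, PySem.List.pyRange_one_eq_nil (by omega : target + 1 ≤ x),
          List.foldl_nil]
      rw [hb]
      refine ih _ (pvUpd x C) hposxs hw (fun m hm => ?_)
      rw [hpt m hm]
      simp only [pvUpd, if_pos hx]
      exact (pvStep_of_lt x.toNat _ m (by omega)).symm

theorem pvB_value (nums : List Int) (target : Int) (hpos : ∀ x ∈ nums, 0 < x) (ht : 1 ≤ target) :
    backpack_iv_dp_alt nums target = pvRef nums target.toNat := by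
  rw [pvB_unfold, if_neg (by omega)]
  obtain ⟨hlen, hpt⟩ := pvB_fold target nums (1 :: List.replicate target.toNat 0) pvInit hpos
    (by rw [List.length_cons, List.length_replicate])
    (by
      intro m hm
      cases m with
      | zero => rfl
      | succ m' =>
        simp [pvInit, List.getD_eq_getElem?_getD, List.getElem?_replicate,
          Nat.lt_of_succ_lt_succ hm])
  rw [pv_pyGetD_toNat _ _ (by omega), hpt target.toNat (by omega)]
  rfl

-- ---------- A side: the 2D table ----------
def pvAK (nums : List Int) (i : Nat) (j : Int) : List (List Int) → Int → List (List Int) := fun dp k =>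
  let num := PySem.List.pyGetD nums (i : Int) 0
  let row := PySem.List.pyGetD dp (i : Int) []
  let cur := PySem.List.pyGetD row j 0
  let v := if k * num = j then cur + 1
           else cur + PySem.List.pyGetD (PySem.List.pyGetD dp ((i : Int) - 1) []) (j - k * num) 0
  PySem.List.pySetD dp (i : Int) (PySem.List.pySetD row j v)

def pvAJ (nums : List Int) (i : Nat) : List (List Int) → Int → List (List Int) := fun dp j =>
  (PySem.List.pyRange 0 (PySem.Int.floordiv j (PySem.List.pyGetD nums (i : Int) 0) + 1) 1).foldl
    (pvAK nums i j) dp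

theorem pvA_unfold (nums : List Int) (target : Int) (h : nums ≠ []) :
    backpack_iv_dp nums target =
      PySem.List.pyGetD (PySem.List.pyGetD
        ((List.range nums.length).foldl (fun dp i =>
            (PySem.List.pyRange 1 (target + 1) 1).foldl (pvAJ nums i) dp)
          (List.replicate nums.length (List.replicate (target + 1).toNat 0)))
        ((nums.length : Int) - 1) []) target 0 := by
  have hlen : ¬ nums.length = 0 := by simpa using h
  simp only [backpack_iv_dp]
  rw [if_neg hlen]
  rfl

def pvCell (dp : List (List Int)) (r m : Nat) : Int := (dp.getD r []).getD m 0

def pvWr (dp : List (List Int)) (i m : Nat) (v : Int) : List (List Int) :=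
  dp.set i ((dp.getD i []).set m v)

theorem pv_len_wr (dp : List (List Int)) (i m : Nat) (v : Int) :
    (pvWr dp i m v).length = dp.length := by
  simp [pvWr]

theorem pv_row_wr_ne (dp : List (List Int)) (i m : Nat) (v : Int) (r : Nat) (hr : r ≠ i) :
    (pvWr dp i m v).getD r [] = dp.getD r [] := by
  rw [pvWr, pv_getD_set]
  rw [if_neg (fun hc => hr hc.1.symm)]

theorem pv_row_wr_self (dp : List (List Int)) (i m : Nat) (v : Int) (hi : i < dp.length) :
    (pvWr dp i m v).getD i [] = (dp.getD i []).set m v := by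
  rw [pvWr, pv_getD_set, if_pos ⟨rfl, hi⟩]

theorem pv_rowlen_wr (dp : List (List Int)) (i m : Nat) (v : Int) (r : Nat) :
    ((pvWr dp i m v).getD r []).length = (dp.getD r []).length := by
  by_cases hr : r = i
  · subst hr
    by_cases hi : r < dp.length
    · rw [pv_row_wr_self dp r m v hi, List.length_set]
    · rw [pvWr, List.set_eq_of_length_le (by omega)]
  · rw [pv_row_wr_ne dp i m v r hr]

theorem pv_cell_wr_self (dp : List (List Int)) (i m : Nat) (v : Int)
    (hi : i < dp.length) (hm : m < (dp.getD i []).length) :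
    pvCell (pvWr dp i m v) i m = v := by
  rw [pvCell, pv_row_wr_self dp i m v hi, pv_getD_set, if_pos ⟨rfl, hm⟩]

theorem pv_cell_wr_pos_ne (dp : List (List Int)) (i m : Nat) (v : Int) (r m' : Nat)
    (hm' : m' ≠ m) : pvCell (pvWr dp i m v) r m' = pvCell dp r m' := by
  by_cases hr : r = i
  · subst hr
    by_cases hi : r < dp.length
    · rw [pvCell, pv_row_wr_self dp r m v hi, pv_getD_set,
        if_neg (fun hc => hm' hc.1.symm)]
      rfl
    · rw [pvCell, pvWr, List.set_eq_of_length_le (by omega)]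
      rfl
  · rw [pvCell, pv_row_wr_ne dp i m v r hr]
    rfl

theorem pv_cell_wr_row_ne (dp : List (List Int)) (i m : Nat) (v : Int) (r m' : Nat)
    (hr : r ≠ i) : pvCell (pvWr dp i m v) r m' = pvCell dp r m' := by
  rw [pvCell, pv_row_wr_ne dp i m v r hr]; rfl

theorem pv_set_self {α : Type} (xs : List α) (n : Nat) (d : α) (hn : n < xs.length) :
    xs.set n (xs.getD n d) = xs := by
  apply List.ext_getElem?
  intro m
  rw [List.getElem?_set]
  split_ifs with h1
  · subst h1
    rw [List.getD_eq_getElem?_getD, List.getElem?_eq_getElem hn]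
    simp
  · rfl

theorem pv_wr_self (dp : List (List Int)) (i m : Nat)
    (hi : i < dp.length) (hm : m < (dp.getD i []).length) :
    pvWr dp i m (pvCell dp i m) = dp := by
  rw [pvWr, pvCell, pv_set_self (dp.getD i []) m 0 hm, pv_set_self dp i [] hi]

-- the k-loop accumulates into cell (i, j) while its reads stay fixed
theorem pvA_kfold (nums : List Int) (i : Nat) (j : Int) (ip : Nat)
    (dp : List (List Int)) (hi : i < dp.length) (hjl : j.toNat < (dp.getD i []).length)
    (hj0 : 0 ≤ j)
    (hprev : ∀ dp' : List (List Int), dp'.length = dp.length →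
       PySem.List.pyGetD dp' ((i : Int) - 1) [] = dp'.getD ip [])
    (ks : List Int)
    (hks : ∀ k ∈ ks, 0 ≤ j - k * (PySem.List.pyGetD nums (i : Int) 0) ∧
       ¬(ip = i ∧ (j - k * (PySem.List.pyGetD nums (i : Int) 0)).toNat = j.toNat)) :
    ∀ v : Int, ks.foldl (pvAK nums i j) (pvWr dp i j.toNat v) =
      pvWr dp i j.toNat (v + (ks.map (fun k =>
        if k * (PySem.List.pyGetD nums (i : Int) 0) = j then (1:Int)
        else pvCell dp ip (j - k * (PySem.List.pyGetD nums (i : Int) 0)).toNat)).sum) := by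
  induction ks with
  | nil => intro v; simp
  | cons k ks ih =>
    intro v
    have hk := hks k (by simp)
    set a := PySem.List.pyGetD nums (i : Int) 0 with hadef
    have hstep : pvAK nums i j (pvWr dp i j.toNat v) k =
        pvWr dp i j.toNat (v + (if k * a = j then (1:Int) else pvCell dp ip (j - k * a).toNat)) := by
      have hrowv : PySem.List.pyGetD (pvWr dp i j.toNat v) (i : Int) [] =
          (dp.getD i []).set j.toNat v := by
        rw [PySem.List.pyGetD_natCast]; exact pv_row_wr_self dp i j.toNat v hi
      have hcur : PySem.List.pyGetD ((dp.getD i []).set j.toNat v) j 0 = v := by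
        rw [pv_pyGetD_toNat _ _ hj0, pv_getD_set]
        have hc : j.toNat = j.toNat ∧ j.toNat < (dp.getD i []).length := ⟨rfl, hjl⟩
        rw [if_pos hc]
      have hrd : PySem.List.pyGetD (PySem.List.pyGetD (pvWr dp i j.toNat v) ((i : Int) - 1) [])
          (j - k * a) 0 = pvCell dp ip (j - k * a).toNat := by
        rw [hprev _ (pv_len_wr dp i j.toNat v), pv_pyGetD_toNat _ _ hk.1]
        by_cases hipi : ip = i
        · subst hipi
          exact pv_cell_wr_pos_ne dp ip j.toNat v ip _ (fun hc => hk.2 ⟨rfl, hc⟩)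
        · exact pv_cell_wr_row_ne dp i j.toNat v ip _ hipi
      show PySem.List.pySetD (pvWr dp i j.toNat v) (i : Int)
          (PySem.List.pySetD (PySem.List.pyGetD (pvWr dp i j.toNat v) (i : Int) []) j
            (if k * a = j
             then PySem.List.pyGetD (PySem.List.pyGetD (pvWr dp i j.toNat v) (i : Int) []) j 0 + 1
             else PySem.List.pyGetD (PySem.List.pyGetD (pvWr dp i j.toNat v) (i : Int) []) j 0 +
               PySem.List.pyGetD (PySem.List.pyGetD (pvWr dp i j.toNat v) ((i : Int) - 1) [])
                 (j - k * a) 0)) = _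
      rw [hrowv, hcur, hrd, PySem.List.pySetD_natCast, pv_pySetD_toNat _ _ _ hj0]
      show (dp.set i ((dp.getD i []).set j.toNat v)).set i
          (((dp.getD i []).set j.toNat v).set j.toNat
            (if k * a = j then v + 1 else v + pvCell dp ip (j - k * a).toNat)) = _
      rw [List.set_set, List.set_set]
      show pvWr dp i j.toNat _ = pvWr dp i j.toNat _
      congr 1
      split_ifs <;> ring
    rw [List.foldl_cons, hstep, ih (fun k' hk' => hks k' (by simp [hk'])) _]
    rw [List.map_cons, List.sum_cons, ← add_assoc]

theorem pvA_kfold_start (nums : List Int) (i : Nat) (j : Int) (ip : Nat)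
    (dp : List (List Int)) (hi : i < dp.length) (hjl : j.toNat < (dp.getD i []).length)
    (hj0 : 0 ≤ j)
    (hprev : ∀ dp' : List (List Int), dp'.length = dp.length →
       PySem.List.pyGetD dp' ((i : Int) - 1) [] = dp'.getD ip [])
    (ks : List Int)
    (hks : ∀ k ∈ ks, 0 ≤ j - k * (PySem.List.pyGetD nums (i : Int) 0) ∧
       ¬(ip = i ∧ (j - k * (PySem.List.pyGetD nums (i : Int) 0)).toNat = j.toNat)) :
    ks.foldl (pvAK nums i j) dp =
      pvWr dp i j.toNat (pvCell dp i j.toNat + (ks.map (fun k =>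
        if k * (PySem.List.pyGetD nums (i : Int) 0) = j then (1:Int)
        else pvCell dp ip (j - k * (PySem.List.pyGetD nums (i : Int) 0)).toNat)).sum) := by
  conv_lhs => rw [← pv_wr_self dp i j.toNat hi hjl]
  exact pvA_kfold nums i j ip dp hi hjl hj0 hprev ks hks _

-- Σ_{k=0}^{j//a} P((j-ka).toNat) is exactly the unbounded-knapsack recurrence pvStep
theorem pvA_sum (a : Int) (ha : 0 < a) (P : Nat → Int) :
    ∀ (N : Nat) (j : Int), 0 ≤ j → j.toNat ≤ N →
    ((PySem.List.pyRange 0 (PySem.Int.floordiv j a + 1) 1).map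
      (fun k => P ((j - k * a).toNat))).sum = pvStep a.toNat P j.toNat := by
  intro N
  induction N with
  | zero =>
    intro j hj hjN
    have hj0 : j = 0 := by omega
    subst hj0
    have hq : PySem.Int.floordiv 0 a = 0 := by
      rw [PySem.Int.floordiv_eq_iff_of_pos ha]
      constructor <;> omega
    rw [hq, PySem.List.pyRange_one_singleton]
    simp [pvStep_of_lt a.toNat P 0 (by omega)]
  | succ N ih =>
    intro j hj hjN
    by_cases hja : j < a
    · have hq : PySem.Int.floordiv j a = 0 := by
        rw [PySem.Int.floordiv_eq_iff_of_pos ha]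
        constructor <;> omega
      rw [hq, PySem.List.pyRange_one_singleton]
      simp [pvStep_of_lt a.toNat P j.toNat (by omega)]
    · push_neg at hja
      set q := PySem.Int.floordiv j a with hqdef
      have hq1 : 1 ≤ q := by rw [hqdef, PySem.Int.le_floordiv_iff_mul_le ha]; omega
      have hqa : q * a ≤ j ∧ j < (q + 1) * a :=
        (PySem.Int.floordiv_eq_iff_of_pos ha).mp hqdef.symm
      have hcons : PySem.List.pyRange 0 (q + 1) 1 = 0 :: PySem.List.pyRange 1 (q + 1) 1 :=
        PySem.List.pyRange_one_cons (by omega)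
      have hqprev : PySem.Int.floordiv (j - a) a = q - 1 := by
        rw [PySem.Int.floordiv_eq_iff_of_pos ha]
        constructor <;> nlinarith [hqa.1, hqa.2]
      have hshift : PySem.List.pyRange 1 (q + 1) 1 =
          (PySem.List.pyRange 0 (q - 1 + 1) 1).map (fun k => k + 1) := by
        rw [PySem.List.pyRange_one, PySem.List.pyRange_one]
        have he : (q + 1 - 1).toNat = (q - 1 + 1 - 0).toNat := by omega
        rw [he, List.map_map]
        apply List.map_congr_left
        intro x _
        simp only [Function.comp_apply]
        ring
      have htail : ((PySem.List.pyRange 1 (q + 1) 1).map (fun k => P ((j - k * a).toNat))).sum =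
          ((PySem.List.pyRange 0 (q - 1 + 1) 1).map (fun k => P ((j - a - k * a).toNat))).sum := by
        rw [hshift, List.map_map]
        congr 1
        apply List.map_congr_left
        intro x _
        simp only [Function.comp_apply]
        congr 2
        ring
      rw [hcons, List.map_cons, List.sum_cons, htail, ← hqprev,
        ih (j - a) (by omega) (by omega)]
      rw [pvStep_of_le a.toNat P j.toNat (by omega) (by omega)]
      have harg : j.toNat - a.toNat = (j - a).toNat := by omega
      rw [harg]
      simp

theorem pv_floordiv_neg (j a : Int) (hj : 1 ≤ j) (ha : a < 0) :
    PySem.Int.floordiv j a < 0 := by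
  have hfm := PySem.Int.floordiv_mul_add_mod j a
  have hmb := PySem.Int.mod_neg_bounds (a := j) (b := a) ha
  by_contra hf
  push_neg at hf
  nlinarith [mul_nonneg hf (neg_nonneg.mpr ha.le)]

theorem pvA_jloop_neg (nums : List Int) (i : Nat) (a : Int)
    (ha : a = PySem.List.pyGetD nums (i : Int) 0) (haneg : a < 0)
    (u : Int) (dp : List (List Int)) :
    (PySem.List.pyRange 1 u 1).foldl (pvAJ nums i) dp = dp := by
  apply pv_foldl_id
  intro dp' j hj
  have hj1 : 1 ≤ j := ((PySem.List.mem_pyRange_one).mp hj).1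
  show (PySem.List.pyRange 0
      (PySem.Int.floordiv j (PySem.List.pyGetD nums (i : Int) 0) + 1) 1).foldl
      (pvAK nums i j) dp' = dp'
  rw [← ha, PySem.List.pyRange_one_eq_nil
    (by have := pv_floordiv_neg j a hj1 haneg; omega)]
  rfl

-- the j-loop on row i, reading a fixed distinct row ip
theorem pvA_jloop (nums : List Int) (target : Int) (ht : 1 ≤ target)
    (i ip : Nat) (hipne : ip ≠ i) (a : Int)
    (ha : a = PySem.List.pyGetD nums (i : Int) 0) (hapos : 0 < a)
    (dp0 : List (List Int)) (hi : i < dp0.length)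
    (hprev : ∀ dp' : List (List Int), dp'.length = dp0.length →
       PySem.List.pyGetD dp' ((i : Int) - 1) [] = dp'.getD ip [])
    (P : Nat → Int) (hP0 : P 0 = 1)
    (hP : ∀ m, 1 ≤ m → m ≤ target.toNat → P m = pvCell dp0 ip m)
    (hrow : (dp0.getD i []).length = target.toNat + 1)
    (hzero : ∀ m, m < target.toNat + 1 → pvCell dp0 i m = 0) :
    ∀ d : Nat, (1 : Int) + d ≤ target + 1 →
      (((PySem.List.pyRange 1 (1 + (d : Int)) 1).foldl (pvAJ nums i) dp0).length = dp0.length ∧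
       (∀ r, r ≠ i → ((PySem.List.pyRange 1 (1 + (d : Int)) 1).foldl (pvAJ nums i) dp0).getD r [] =
          dp0.getD r []) ∧
       (((PySem.List.pyRange 1 (1 + (d : Int)) 1).foldl (pvAJ nums i) dp0).getD i []).length =
          target.toNat + 1 ∧
       (∀ m, m < target.toNat + 1 →
         pvCell ((PySem.List.pyRange 1 (1 + (d : Int)) 1).foldl (pvAJ nums i) dp0) i m =
           if 1 ≤ m ∧ (m : Int) < 1 + d then pvStep a.toNat P m else 0)) := by
  intro d
  induction d with
  | zero =>
    intro _
    rw [show (1 : Int) + ((0:Nat) : Int) = 1 by simp, PySem.List.pyRange_one_eq_nil le_rfl]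
    refine ⟨rfl, fun r _ => rfl, hrow, fun m hm => ?_⟩
    rw [List.foldl_nil]
    split_ifs with hc
    · exfalso; omega
    · exact hzero m hm
  | succ d ih =>
    intro hbound
    obtain ⟨ihlen, ihne, ihrow, ihcell⟩ := ih (by push_cast at hbound ⊢; omega)
    have hsplit : PySem.List.pyRange 1 (1 + ((d+1 : Nat) : Int)) 1 =
        PySem.List.pyRange 1 (1 + (d : Int)) 1 ++ [1 + (d : Int)] := by
      have he : 1 + ((d+1 : Nat) : Int) = (1 + (d : Int)) + 1 := by push_cast; ring
      rw [he]
      exact PySem.List.pyRange_one_succ_right (by omega)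
    rw [hsplit, List.foldl_append]
    set F := (PySem.List.pyRange 1 (1 + (d : Int)) 1).foldl (pvAJ nums i) dp0 with hF
    simp only [List.foldl_cons, List.foldl_nil]
    set j : Int := 1 + (d : Int) with hj
    have hj1 : 1 ≤ j := by omega
    have hjT : j.toNat < target.toNat + 1 := by push_cast at hbound; omega
    have hiF : i < F.length := by rw [ihlen]; exact hi
    have hjlF : j.toNat < (F.getD i []).length := by rw [ihrow]; exact hjT
    have hprevF : ∀ dp' : List (List Int), dp'.length = F.length →
        PySem.List.pyGetD dp' ((i : Int) - 1) [] = dp'.getD ip [] := by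
      intro dp' hl
      exact hprev dp' (by rw [hl, ihlen])
    have hks : ∀ k ∈ PySem.List.pyRange 0
        (PySem.Int.floordiv j (PySem.List.pyGetD nums (i : Int) 0) + 1) 1,
        0 ≤ j - k * (PySem.List.pyGetD nums (i : Int) 0) ∧
        ¬(ip = i ∧ (j - k * (PySem.List.pyGetD nums (i : Int) 0)).toNat = j.toNat) := by
      intro k hk
      rw [PySem.List.mem_pyRange_one] at hk
      refine ⟨?_, fun hc => hipne hc.1⟩
      rw [← ha] at hk ⊢
      have : k * a ≤ j := (PySem.Int.le_floordiv_iff_mul_le hapos).mp (by omega)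
      omega
    have hAJ : pvAJ nums i F j = pvWr F i j.toNat (pvCell F i j.toNat +
        ((PySem.List.pyRange 0
          (PySem.Int.floordiv j (PySem.List.pyGetD nums (i : Int) 0) + 1) 1).map
          (fun k => if k * (PySem.List.pyGetD nums (i : Int) 0) = j then (1:Int)
            else pvCell F ip (j - k * (PySem.List.pyGetD nums (i : Int) 0)).toNat)).sum) :=
      pvA_kfold_start nums i j ip F hiF hjlF (by omega) hprevF _ hks
    have hcur0 : pvCell F i j.toNat = 0 := by
      rw [ihcell j.toNat hjT]
      rw [if_neg (by omega)]
    have hS : ((PySem.List.pyRange 0 (PySem.Int.floordiv j a + 1) 1).map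
        (fun k => if k * a = j then (1:Int) else pvCell F ip (j - k * a).toNat)).sum =
        pvStep a.toNat P j.toNat := by
      have hmap : (PySem.List.pyRange 0 (PySem.Int.floordiv j a + 1) 1).map
          (fun k => if k * a = j then (1:Int) else pvCell F ip (j - k * a).toNat) =
          (PySem.List.pyRange 0 (PySem.Int.floordiv j a + 1) 1).map
            (fun k => P ((j - k * a).toNat)) := by
        apply List.map_congr_left
        intro k hk
        rw [PySem.List.mem_pyRange_one] at hk
        have hka : k * a ≤ j := (PySem.Int.le_floordiv_iff_mul_le hapos).mp (by omega)
        have hka0 : 0 ≤ k * a := mul_nonneg (by omega) (by omega)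
        by_cases hbr : k * a = j
        · rw [if_pos hbr]
          have hz : (j - k * a).toNat = 0 := by omega
          rw [hz, hP0]
        · rw [if_neg hbr]
          have h1 : 1 ≤ (j - k * a).toNat := by omega
          have h2 : (j - k * a).toNat ≤ target.toNat := by omega
          rw [hP _ h1 h2]
          show pvCell F ip _ = pvCell dp0 ip _
          unfold pvCell
          rw [ihne ip hipne]
      rw [hmap, pvA_sum a hapos P j.toNat j (by omega) le_rfl]
    rw [hAJ, ← ha, hcur0, zero_add, hS]
    refine ⟨?_, ?_, ?_, ?_⟩
    · rw [pv_len_wr]; exact ihlen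
    · intro r hr
      rw [pv_row_wr_ne _ _ _ _ _ hr]
      exact ihne r hr
    · rw [pv_rowlen_wr]; exact ihrow
    · intro m hm
      by_cases hmj : m = j.toNat
      · subst hmj
        rw [pv_cell_wr_self F i _ _ hiF hjlF]
        rw [if_pos (by refine ⟨by omega, ?_⟩; push_cast; omega)]
      · rw [pv_cell_wr_pos_ne F i j.toNat _ i m hmj, ihcell m hm]
        by_cases hc : 1 ≤ m ∧ (m : Int) < 1 + (d : Int)
        · rw [if_pos hc, if_pos (by push_cast at hc ⊢; omega)]
        · rw [if_neg hc, if_neg (by push_cast at hc ⊢; omega)]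

def pvAOut (nums : List Int) (target : Int) (i : Nat) : List (List Int) :=
  (List.range i).foldl (fun dp (i' : Nat) =>
      (PySem.List.pyRange 1 (target + 1) 1).foldl (pvAJ nums i') dp)
    (List.replicate nums.length (List.replicate (target + 1).toNat 0))

theorem pvA_unfold2 (nums : List Int) (target : Int) (h : nums ≠ []) :
    backpack_iv_dp nums target =
      PySem.List.pyGetD (PySem.List.pyGetD (pvAOut nums target nums.length)
        ((nums.length : Int) - 1) []) target 0 :=
  pvA_unfold nums target h

theorem pv_pyGetD_neg_one_getD (xs : List (List Int)) (h : xs ≠ []) :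
    PySem.List.pyGetD xs (-1) [] = xs.getD (xs.length - 1) [] := by
  rw [PySem.List.pyGetD_neg_one xs [] h]
  have hl : 0 < xs.length := List.length_pos_iff.mpr h
  rw [List.getLast_eq_getElem, List.getD_eq_getElem?_getD,
    List.getElem?_eq_getElem (by omega)]
  rfl

theorem pv_row_replicate (n L r : Nat) (hr : r < n) :
    (List.replicate n (List.replicate L (0:Int))).getD r [] = List.replicate L 0 := by
  rw [List.getD_eq_getElem?_getD, List.getElem?_replicate, if_pos hr]
  rfl

theorem pv_cell_replicate (n L r m : Nat) :
    pvCell (List.replicate n (List.replicate L (0:Int))) r m = 0 := by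
  unfold pvCell
  by_cases hr : r < n
  · rw [pv_row_replicate n L r hr, List.getD_eq_getElem?_getD, List.getElem?_replicate]
    split_ifs <;> rfl
  · have hrow : (List.replicate n (List.replicate L (0:Int))).getD r [] = [] := by
      rw [List.getD_eq_getElem?_getD, List.getElem?_replicate, if_neg hr]
      rfl
    rw [hrow]
    rfl

theorem pvA_outer (nums : List Int) (target : Int) (ht : 1 ≤ target)
    (hn2 : 2 ≤ nums.length) (h0 : (0:Int) ∉ nums) :
    ∀ i, i ≤ nums.length →
      ((pvAOut nums target i).length = nums.length ∧
       (∀ r, r < nums.length → ((pvAOut nums target i).getD r []).length = target.toNat + 1) ∧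
       (∀ r m, r < nums.length → m < target.toNat + 1 →
         pvCell (pvAOut nums target i) r m =
           if r < i ∧ 1 ≤ m then pvRef (nums.take (r + 1)) m else 0)) := by
  have hT1 : (target + 1).toNat = target.toNat + 1 := by omega
  intro i
  induction i with
  | zero =>
    intro _
    refine ⟨by simp [pvAOut], fun r hr => ?_, fun r m hr hm => ?_⟩
    · show ((List.replicate nums.length (List.replicate (target+1).toNat 0)).getD r []).length = _
      rw [pv_row_replicate nums.length ((target+1).toNat) r hr, List.length_replicate, hT1]
    · show pvCell (List.replicate nums.length (List.replicate (target+1).toNat 0)) r m = _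
      rw [pv_cell_replicate, if_neg (by omega)]
  | succ i ih =>
    intro hi1
    have hi : i < nums.length := by omega
    obtain ⟨ihlen, ihrow, ihcell⟩ := ih (by omega)
    have hstep : pvAOut nums target (i+1) =
        (PySem.List.pyRange 1 (target + 1) 1).foldl (pvAJ nums i) (pvAOut nums target i) := by
      rw [pvAOut, pvAOut, List.range_succ, List.foldl_append, List.foldl_cons, List.foldl_nil]
    set a : Int := nums.getD i 0 with hadef
    have haget : a = PySem.List.pyGetD nums (i : Int) 0 := by rw [PySem.List.pyGetD_natCast]
    have hai : a = nums[i]'hi := by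
      rw [hadef, List.getD_eq_getElem?_getD, List.getElem?_eq_getElem hi]
      rfl
    have hamem : a ∈ nums := by rw [hai]; exact List.getElem_mem hi
    have hane : a ≠ 0 := fun hc => h0 (hc ▸ hamem)
    have htake : pvRef (nums.take (i+1)) = pvUpd a (pvRef (nums.take i)) := by
      rw [List.take_add_one, List.getElem?_eq_getElem hi,
        show (some (nums[i]'hi)).toList = [nums[i]'hi] from rfl, pvRef_append, ← hai]
    by_cases hapos : 0 < a
    · set ip := if i = 0 then nums.length - 1 else i - 1 with hip
      have hipne : ip ≠ i := by rw [hip]; split_ifs <;> omega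
      have hprev : ∀ dp' : List (List Int), dp'.length = (pvAOut nums target i).length →
          PySem.List.pyGetD dp' ((i : Int) - 1) [] = dp'.getD ip [] := by
        intro dp' hl
        rw [ihlen] at hl
        by_cases hi0 : i = 0
        · subst hi0
          rw [show ((0:Nat) : Int) - 1 = -1 by simp]
          rw [pv_pyGetD_neg_one_getD dp'
            (by intro hc; rw [hc] at hl; simp at hl; omega), hl, hip, if_pos rfl]
        · rw [hip, if_neg hi0,
            show (i : Int) - 1 = ((i - 1 : Nat) : Int) by omega, PySem.List.pyGetD_natCast]
      have hP0 : pvRef (nums.take i) 0 = 1 := pvRef_zero _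
      have hPm : ∀ m, 1 ≤ m → m ≤ target.toNat →
          pvRef (nums.take i) m = pvCell (pvAOut nums target i) ip m := by
        intro m h1 h2
        by_cases hi0 : i = 0
        · subst hi0
          rw [ihcell ip m (by rw [hip, if_pos rfl]; omega) (by omega), if_neg (by omega),
            List.take_zero]
          show pvInit m = 0
          rw [pvInit]
          simp only [if_neg (by omega : ¬ m = 0)]
        · have hipi : ip = i - 1 := by rw [hip, if_neg hi0]
          rw [ihcell ip m (by omega) (by omega), if_pos ⟨by omega, h1⟩, hipi,
            show i - 1 + 1 = i by omega]
      have hjl := pvA_jloop nums target ht i ip hipne a haget hapos (pvAOut nums target i)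
        (by rw [ihlen]; omega) hprev (pvRef (nums.take i)) hP0 hPm
        (by rw [ihrow i hi]) (fun m hm => by rw [ihcell i m hi hm, if_neg (by omega)])
        target.toNat (by omega)
      rw [show (1 : Int) + (target.toNat : Int) = target + 1 by omega] at hjl
      obtain ⟨jlen, jne, jrow, jcell⟩ := hjl
      rw [hstep]
      refine ⟨by rw [jlen, ihlen], fun r hr => ?_, fun r m hr hm => ?_⟩
      · by_cases hri : r = i
        · subst hri; rw [jrow]
        · rw [jne r hri]; exact ihrow r hr
      · by_cases hri : r = i
        · subst hri
          rw [jcell m hm]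
          by_cases h1m : 1 ≤ m
          · rw [if_pos ⟨h1m, by omega⟩, if_pos ⟨by omega, h1m⟩, htake, pvUpd, if_pos hapos]
          · rw [if_neg (by omega), if_neg (by omega)]
        · have hcells : pvCell ((PySem.List.pyRange 1 (target + 1) 1).foldl (pvAJ nums i)
              (pvAOut nums target i)) r m = pvCell (pvAOut nums target i) r m := by
            unfold pvCell
            rw [jne r hri]
          rw [hcells, ihcell r m hr hm]
          by_cases hc : r < i ∧ 1 ≤ m
          · rw [if_pos hc, if_pos ⟨by omega, hc.2⟩]
          · rw [if_neg hc, if_neg (by omega)]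
    · have haneg : a < 0 := by omega
      rw [hstep, pvA_jloop_neg nums i a haget haneg _ _]
      refine ⟨ihlen, ihrow, fun r m hr hm => ?_⟩
      rw [ihcell r m hr hm]
      by_cases hri : r = i
      · subst hri
        rw [if_neg (by omega)]
        by_cases h1m : 1 ≤ m
        · rw [if_pos ⟨by omega, h1m⟩, htake, pvUpd, if_neg hapos]
          show (0:Int) = pvInit m
          rw [pvInit]
          simp only [if_neg (by omega : ¬ m = 0)]
        · rw [if_neg (by omega)]
      · by_cases hc : r < i ∧ 1 ≤ m
        · rw [if_pos hc, if_pos ⟨by omega, hc.2⟩]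
        · rw [if_neg hc, if_neg (by omega)]

theorem pvA_value_ge2 (nums : List Int) (target : Int) (ht : 1 ≤ target)
    (hn2 : 2 ≤ nums.length) (h0 : (0:Int) ∉ nums) :
    backpack_iv_dp nums target = pvRef nums target.toNat := by
  rw [pvA_unfold2 nums target (by intro hc; rw [hc] at hn2; simp at hn2)]
  obtain ⟨hlen, hrow, hcell⟩ := pvA_outer nums target ht hn2 h0 nums.length le_rfl
  rw [show (nums.length : Int) - 1 = ((nums.length - 1 : Nat) : Int) by omega,
    PySem.List.pyGetD_natCast, pv_pyGetD_toNat _ _ (by omega)]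
  have := hcell (nums.length - 1) target.toNat (by omega) (by omega)
  rw [pvCell] at this
  rw [this, if_pos ⟨by omega, by omega⟩, show nums.length - 1 + 1 = nums.length by omega,
    List.take_length]

-- n = 1: row 0 reads itself through dp[-1]; we track zero/one/ge-two facts per cell
def pvOneInv (a : Int) (u : Int) (F : List (List Int)) (T : Nat) : Prop :=
  F.length = 1 ∧ (F.getD 0 []).length = T + 1 ∧
  ∀ m, m < T + 1 →
    ((m = 0 ∨ ¬ (a ∣ (m : Int)) ∨ u ≤ (m : Int)) → pvCell F 0 m = 0) ∧
    (((m : Int) = a ∧ (m : Int) < u) → pvCell F 0 m = 1) ∧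
    ((a ∣ (m : Int) ∧ 2 * a ≤ (m : Int) ∧ (m : Int) < u) → 2 ≤ pvCell F 0 m)

theorem pvA_jloop_one (a target : Int) (ht : 1 ≤ target) (hapos : 0 < a)
    (dp0 : List (List Int)) (hlen : dp0.length = 1)
    (hrow : (dp0.getD 0 []).length = target.toNat + 1)
    (hzero : ∀ m, m < target.toNat + 1 → pvCell dp0 0 m = 0) :
    ∀ d : Nat, (1 : Int) + d ≤ target + 1 →
      pvOneInv a (1 + (d : Int))
        ((PySem.List.pyRange 1 (1 + (d : Int)) 1).foldl (pvAJ [a] 0) dp0) target.toNat := by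
  have ha0 : PySem.List.pyGetD [a] ((0 : Nat) : Int) 0 = a := by
    rw [PySem.List.pyGetD_natCast]
    rfl
  intro d
  induction d with
  | zero =>
    intro _
    rw [show (1 : Int) + ((0 : Nat) : Int) = 1 by simp, PySem.List.pyRange_one_eq_nil le_rfl]
    refine ⟨hlen, hrow, fun m hm => ⟨fun hc => hzero m hm, fun hc => ?_, fun hc => ?_⟩⟩
    · exfalso; omega
    · exfalso; omega
  | succ d ih =>
    intro hbound
    obtain ⟨ihlen, ihrow, ihcell⟩ := ih (by push_cast at hbound ⊢; omega)
    have hsplit : PySem.List.pyRange 1 (1 + ((d + 1 : Nat) : Int)) 1 =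
        PySem.List.pyRange 1 (1 + (d : Int)) 1 ++ [1 + (d : Int)] := by
      have he : 1 + ((d + 1 : Nat) : Int) = (1 + (d : Int)) + 1 := by push_cast; ring
      rw [he]
      exact PySem.List.pyRange_one_succ_right (by omega)
    rw [hsplit, List.foldl_append]
    set F := (PySem.List.pyRange 1 (1 + (d : Int)) 1).foldl (pvAJ [a] 0) dp0 with hF
    simp only [List.foldl_cons, List.foldl_nil]
    set j : Int := 1 + (d : Int) with hj
    have hj1 : 1 ≤ j := by omega
    have hjT : j.toNat < target.toNat + 1 := by push_cast at hbound; omega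
    have h0F : (0 : Nat) < F.length := by omega
    have hjlF : j.toNat < (F.getD 0 []).length := by rw [ihrow]; exact hjT
    have hFne : F ≠ [] := by intro hc; rw [hc] at ihlen; simp at ihlen
    have hq0 : 0 ≤ PySem.Int.floordiv j a := by
      rw [PySem.Int.le_floordiv_iff_mul_le hapos]; omega
    set q := PySem.Int.floordiv j a with hqdef
    have hqa : q * a ≤ j ∧ j < (q + 1) * a := (PySem.Int.floordiv_eq_iff_of_pos hapos).mp hqdef.symm
    have hcons : PySem.List.pyRange 0 (q + 1) 1 = 0 :: PySem.List.pyRange 1 (q + 1) 1 :=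
      PySem.List.pyRange_one_cons (by omega)
    have hcurF : pvCell F 0 j.toNat = 0 :=
      (ihcell j.toNat hjT).1 (by right; right; omega)
    -- the k = 0 step writes the cell's own (still zero) value back: a no-op
    have hk0 : pvAK [a] 0 j F 0 = F := by
      show PySem.List.pySetD F ((0 : Nat) : Int)
          (PySem.List.pySetD (PySem.List.pyGetD F ((0 : Nat) : Int) []) j
            (if (0 : Int) * PySem.List.pyGetD [a] ((0 : Nat) : Int) 0 = j
             then PySem.List.pyGetD (PySem.List.pyGetD F ((0 : Nat) : Int) []) j 0 + 1
             else PySem.List.pyGetD (PySem.List.pyGetD F ((0 : Nat) : Int) []) j 0 +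
               PySem.List.pyGetD (PySem.List.pyGetD F (((0 : Nat) : Int) - 1) [])
                 (j - 0 * PySem.List.pyGetD [a] ((0 : Nat) : Int) 0) 0)) = F
      rw [ha0, if_neg (by omega : ¬ (0 : Int) * a = j)]
      rw [show ((0 : Nat) : Int) - 1 = -1 by simp, pv_pyGetD_neg_one_getD F hFne,
        show F.length - 1 = 0 by omega]
      rw [PySem.List.pyGetD_natCast, show j - 0 * a = j by ring, pv_pyGetD_toNat _ _ (by omega)]
      show PySem.List.pySetD F ((0 : Nat) : Int)
          (PySem.List.pySetD (F.getD 0 []) j (pvCell F 0 j.toNat + pvCell F 0 j.toNat)) = F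
      rw [hcurF, PySem.List.pySetD_natCast, pv_pySetD_toNat _ _ _ (by omega)]
      show pvWr F 0 j.toNat (0 + 0) = F
      rw [show (0 : Int) + 0 = pvCell F 0 j.toNat by omega]
      exact pv_wr_self F 0 j.toNat h0F hjlF
    have hprevF : ∀ dp' : List (List Int), dp'.length = F.length →
        PySem.List.pyGetD dp' (((0 : Nat) : Int) - 1) [] = dp'.getD 0 [] := by
      intro dp' hl
      rw [show ((0 : Nat) : Int) - 1 = -1 by simp,
        pv_pyGetD_neg_one_getD dp' (by intro hc; rw [hc] at hl; simp at hl; omega),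
        show dp'.length - 1 = 0 by omega]
    have hks : ∀ k ∈ PySem.List.pyRange 1 (q + 1) 1,
        0 ≤ j - k * (PySem.List.pyGetD [a] ((0 : Nat) : Int) 0) ∧
        ¬((0 : Nat) = 0 ∧ (j - k * (PySem.List.pyGetD [a] ((0 : Nat) : Int) 0)).toNat = j.toNat) := by
      intro k hk
      rw [PySem.List.mem_pyRange_one] at hk
      rw [ha0]
      have hka : k * a ≤ j := by
        rw [← hqdef] at *
        exact (PySem.Int.le_floordiv_iff_mul_le hapos).mp (by omega)
      have hka1 : a ≤ k * a := le_mul_of_one_le_left hapos.le (by omega)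
      refine ⟨by omega, fun hc => ?_⟩
      omega
    have hkstart := pvA_kfold_start [a] 0 j 0 F h0F hjlF (by omega) hprevF _ hks
    have hAJ : pvAJ [a] 0 F j = pvWr F 0 j.toNat
        (((PySem.List.pyRange 1 (q + 1) 1).map (fun k =>
          if k * a = j then (1 : Int) else pvCell F 0 (j - k * a).toNat)).sum) := by
      show (PySem.List.pyRange 0
          (PySem.Int.floordiv j (PySem.List.pyGetD [a] ((0 : Nat) : Int) 0) + 1) 1).foldl
          (pvAK [a] 0 j) F = _
      rw [ha0, ← hqdef, hcons, List.foldl_cons, hk0, hkstart, hcurF, zero_add, ha0]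
    -- per-k facts about the summands
    have hterm : ∀ k, k ∈ PySem.List.pyRange 1 (q + 1) 1 →
        (1 ≤ k ∧ k * a ≤ j ∧ a ≤ k * a ∧ 0 ≤ j - k * a ∧ j - k * a ≤ j - a) := by
      intro k hk
      rw [PySem.List.mem_pyRange_one] at hk
      have hka : k * a ≤ j := by
        rw [← hqdef] at *
        exact (PySem.Int.le_floordiv_iff_mul_le hapos).mp (by omega)
      have hka1 : a ≤ k * a := le_mul_of_one_le_left hapos.le (by omega)
      have hge : a ≤ k * a := hka1
      refine ⟨by omega, hka, hka1, by omega, ?_⟩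
      nlinarith [hk.1, hapos]
    rw [hAJ]
    refine ⟨by rw [pv_len_wr]; exact ihlen, by rw [pv_rowlen_wr]; exact ihrow, fun m hm => ?_⟩
    by_cases hmj : m = j.toNat
    · subst hmj
      rw [pv_cell_wr_self F 0 _ _ h0F hjlF]
      by_cases hdvd : a ∣ j
      · obtain ⟨t, htt⟩ := hdvd
        have ht1 : 1 ≤ t := by nlinarith
        by_cases h2a : 2 * a ≤ j
        · -- every summand is ≥ 1 and there are q ≥ 2 of them
          have hq2 : 2 ≤ q := by
            rw [hqdef, PySem.Int.le_floordiv_iff_mul_le hapos]; omega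
          have hall : ∀ x ∈ (PySem.List.pyRange 1 (q + 1) 1).map (fun k =>
              if k * a = j then (1 : Int) else pvCell F 0 (j - k * a).toNat), 1 ≤ x := by
            intro x hx
            rw [List.mem_map] at hx
            obtain ⟨k, hk, rfl⟩ := hx
            obtain ⟨hk1, hka, hkaa, hpos, hle⟩ := hterm k hk
            by_cases hbr : k * a = j
            · rw [if_pos hbr]
            · rw [if_neg hbr]
              have hdv : a ∣ (((j - k * a).toNat : Int)) := by
                rw [show ((j - k * a).toNat : Int) = j - k * a by omega]
                exact Dvd.dvd.sub ⟨t, htt⟩ (Dvd.intro_left k rfl)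
              have hm1 : 1 ≤ (j - k * a).toNat := by omega
              have hmlt : ((j - k * a).toNat : Int) < 1 + (d : Int) := by omega
              have hmT : (j - k * a).toNat < target.toNat + 1 := by omega
              have hdvKeep := hdv
              obtain ⟨t2, ht2⟩ := hdvKeep
              have hm1' : (1 : Int) ≤ ((j - k * a).toNat : Int) := by omega
              have ht21 : 1 ≤ t2 := by nlinarith [ht2, hm1', hapos]
              by_cases ht22 : t2 = 1
              · subst ht22
                exact le_of_eq ((ihcell _ hmT).2.1 ⟨by rw [ht2]; ring, hmlt⟩).symm
              · have ht23 : 2 ≤ t2 := by omega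
                have hge2 : 2 * a ≤ ((j - k * a).toNat : Int) := by
                  nlinarith [ht2, mul_le_mul_of_nonneg_left ht23 hapos.le]
                have := (ihcell _ hmT).2.2 ⟨hdv, hge2, hmlt⟩
                omega
          have hcard := pv_card_le_sum _ hall
          rw [List.length_map, PySem.List.length_pyRange_one] at hcard
          have hqq : ((q + 1 - 1).toNat : Int) = q := by omega
          rw [hqq] at hcard
          refine ⟨fun hc => ?_, fun hc => ?_, fun _ => by omega⟩
          · exfalso
            rcases hc with hc | hc | hc
            · omega
            · exact hc (by rw [show ((j.toNat : Nat) : Int) = j by omega]; exact ⟨t, htt⟩)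
            · omega
          · exfalso; omega
        · -- a ∣ j and j < 2a: j = a, the single k = 1 contributes the 1
          have hta : t = 1 := by
            by_contra hcon
            have h2t : 2 ≤ t := by omega
            nlinarith [htt, mul_le_mul_of_nonneg_left h2t hapos.le, h2a]
          have hja : j = a := by rw [htt, hta, mul_one]
          have hq1 : q = 1 := by
            rw [hqdef, PySem.Int.floordiv_eq_iff_of_pos hapos]
            constructor <;> nlinarith
          have hsing : PySem.List.pyRange 1 (q + 1) 1 = [1] := by
            rw [hq1]
            exact PySem.List.pyRange_one_singleton 1
          rw [hsing]
          simp only [List.map_cons, List.map_nil, List.sum_cons, List.sum_nil]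
          rw [if_pos (by rw [one_mul, hja]), add_zero]
          refine ⟨fun hc => ?_, fun _ => rfl, fun hc => ?_⟩
          · exfalso
            rcases hc with hc | hc | hc
            · omega
            · exact hc (by rw [show ((j.toNat : Nat) : Int) = j by omega]; exact ⟨1, by omega⟩)
            · omega
          · exfalso; omega
      · -- a does not divide j: every summand is 0
        have hzero' : ∀ x ∈ (PySem.List.pyRange 1 (q + 1) 1).map (fun k =>
            if k * a = j then (1 : Int) else pvCell F 0 (j - k * a).toNat), x = 0 := by
          intro x hx
          rw [List.mem_map] at hx
          obtain ⟨k, hk, rfl⟩ := hx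
          obtain ⟨hk1, hka, hkaa, hpos, hle⟩ := hterm k hk
          have hbr : ¬ k * a = j := fun hc => hdvd (Dvd.intro_left k hc)
          rw [if_neg hbr]
          have hndv : ¬ a ∣ (((j - k * a).toNat : Int)) := by
            rw [show ((j - k * a).toNat : Int) = j - k * a by omega]
            intro hc
            exact hdvd (by
              have := dvd_add hc (Dvd.intro_left k (rfl : k * a = k * a))
              simpa using this)
          have hmT : (j - k * a).toNat < target.toNat + 1 := by omega
          exact (ihcell _ hmT).1 (by right; left; exact hndv)
        rw [List.sum_eq_zero hzero']
        refine ⟨fun _ => rfl, fun hc => ?_, fun hc => ?_⟩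
        · exact absurd (⟨1, by omega⟩ : a ∣ j) hdvd
        · exfalso
          obtain ⟨t, ht⟩ := hc.1
          exact hdvd ⟨t, by omega⟩
    · rw [pv_cell_wr_pos_ne F 0 j.toNat _ 0 m hmj]
      obtain ⟨iZ, iE, iG⟩ := ihcell m hm
      refine ⟨fun hc => iZ ?_, fun hc => iE ⟨hc.1, by omega⟩, fun hc => iG ⟨hc.1, hc.2.1, by omega⟩⟩
      rcases hc with hc | hc | hc
      · left; exact hc
      · right; left; exact hc
      · right; right; omega

theorem pvA_value_one_pos (a target : Int) (ht : 1 ≤ target) (hapos : 0 < a) :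
    pvOneInv a (target + 1) (pvAOut [a] target 1) target.toNat := by
  have hT1 : (target + 1).toNat = target.toNat + 1 := by omega
  have h := pvA_jloop_one a target ht hapos
    (List.replicate 1 (List.replicate (target + 1).toNat 0)) (by simp)
    (by rw [pv_row_replicate 1 _ 0 (by omega), List.length_replicate, hT1])
    (fun m _ => pv_cell_replicate 1 _ 0 m)
    target.toNat (by omega)
  rw [show (1 : Int) + (target.toNat : Int) = target + 1 by omega] at h
  have heq : pvAOut [a] target 1 = (PySem.List.pyRange 1 (target + 1) 1).foldl (pvAJ [a] 0)
      (List.replicate 1 (List.replicate (target + 1).toNat 0)) := by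
    rw [pvAOut, show List.range 1 = [0] from rfl, List.foldl_cons, List.foldl_nil]
    rfl
  rw [heq]
  exact h

theorem pvA_result_one (a target : Int) (ht : 0 ≤ target) :
    backpack_iv_dp [a] target = pvCell (pvAOut [a] target 1) 0 target.toNat := by
  rw [pvA_unfold2 [a] target (by simp)]
  rw [show (([a] : List Int).length : Int) - 1 = ((0 : Nat) : Int) by simp,
    PySem.List.pyGetD_natCast, pv_pyGetD_toNat _ _ ht]
  rfl

theorem pvA_value_one_nodvd (a target : Int) (ht : 1 ≤ target) (hapos : 0 < a)
    (hnd : ¬ a ∣ target) : backpack_iv_dp [a] target = 0 := by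
  rw [pvA_result_one a target (by omega)]
  obtain ⟨_, _, hcells⟩ := pvA_value_one_pos a target ht hapos
  refine (hcells target.toNat (by omega)).1 ?_
  right; left
  rw [show ((target.toNat : Nat) : Int) = target by omega]
  exact hnd

theorem pvA_value_one_eq (a target : Int) (ht : 1 ≤ target) (hapos : 0 < a)
    (heq : target = a) : backpack_iv_dp [a] target = 1 := by
  rw [pvA_result_one a target (by omega)]
  obtain ⟨_, _, hcells⟩ := pvA_value_one_pos a target ht hapos
  refine (hcells target.toNat (by omega)).2.1 ⟨?_, by omega⟩
  rw [show ((target.toNat : Nat) : Int) = target by omega]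
  exact heq

theorem pvA_value_one_ge2 (a target : Int) (ht : 1 ≤ target) (hapos : 0 < a)
    (hdvd : a ∣ target) (h2a : 2 * a ≤ target) : 2 ≤ backpack_iv_dp [a] target := by
  rw [pvA_result_one a target (by omega)]
  obtain ⟨_, _, hcells⟩ := pvA_value_one_pos a target ht hapos
  refine (hcells target.toNat (by omega)).2.2 ⟨?_, by omega, by omega⟩
  rw [show ((target.toNat : Nat) : Int) = target by omega]
  exact hdvd

theorem pvA_value_t0 (nums : List Int) (h : nums ≠ []) : backpack_iv_dp nums 0 = 0 := by
  have hlen1 : 0 < nums.length := List.length_pos_iff.mpr h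
  rw [pvA_unfold2 nums 0 h]
  have hAOut : pvAOut nums 0 nums.length =
      List.replicate nums.length (List.replicate ((0 : Int) + 1).toNat 0) := by
    rw [pvAOut]
    apply pv_foldl_id
    intro dp i' _
    rw [PySem.List.pyRange_one_eq_nil (by omega : (0 : Int) + 1 ≤ 1)]
    rfl
  rw [hAOut, show ((nums.length : Nat) : Int) - 1 = ((nums.length - 1 : Nat) : Int) by omega,
    PySem.List.pyGetD_natCast, pv_row_replicate _ _ _ (by omega),
    pv_pyGetD_toNat _ _ le_rfl]
  rw [List.getD_eq_getElem?_getD, List.getElem?_replicate]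
  split_ifs <;> rfl

theorem pvRef_one_pos (a : Int) (hapos : 0 < a) (m : Nat) :
    pvRef [a] m = if m % a.toNat = 0 then 1 else 0 := by
  show pvUpd a pvInit m = _
  simp only [pvUpd, if_pos hapos]
  exact pvStep_init a.toNat (by omega) m

theorem pv_dvd_iff (a target : Int) (hapos : 0 < a) (ht : 0 ≤ target) :
    target.toNat % a.toNat = 0 ↔ a ∣ target := by
  rw [show (target.toNat % a.toNat = 0) = (a.toNat ∣ target.toNat) from
    propext ⟨Nat.dvd_of_mod_eq_zero, Nat.mod_eq_zero_of_dvd⟩]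
  constructor
  · intro h
    have h2 := Int.natCast_dvd_natCast.mpr h
    rwa [show ((a.toNat : Nat) : Int) = a by omega,
      show ((target.toNat : Nat) : Int) = target by omega] at h2
  · intro h
    apply Int.natCast_dvd_natCast.mp
    rwa [show ((a.toNat : Nat) : Int) = a by omega,
      show ((target.toNat : Nat) : Int) = target by omega]

theorem pvB_one (a target : Int) (ht : 1 ≤ target) (hapos : 0 < a) :
    backpack_iv_dp_alt [a] target = if a ∣ target then 1 else 0 := by
  rw [pvB_value [a] target (by intro x hx; rw [List.mem_singleton] at hx; omega) ht,
    pvRef_one_pos a hapos]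
  by_cases h : a ∣ target
  · rw [if_pos h, if_pos ((pv_dvd_iff a target hapos (by omega)).mpr h)]
  · rw [if_neg h, if_neg (fun hc => h ((pv_dvd_iff a target hapos (by omega)).mp hc))]

-- ===== VERDICT (by name: the statement is the Claim_ definition above) =====
theorem backpack_iv_dp_spec : Claim_unchanged_backpack_iv_dp := by
  intro nums target hdom hpre hnd
  obtain ⟨hp1, hp2⟩ := hpre
  show backpack_iv_dp nums target = backpack_iv_dp_alt nums target
  by_cases hne : nums = []
  · subst hne
    rw [pvB_unfold]
    show (0 : Int) = _
    split_ifs with h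
    · rfl
    · rw [List.foldl_nil, pv_pyGetD_toNat _ _ (by omega)]
      rw [List.getD_eq_getElem?_getD]
      rcases Nat.lt_or_ge target.toNat (1 :: List.replicate target.toNat (0:Int)).length with hlt | hge
      · rcases Nat.eq_zero_or_pos target.toNat with h0 | h0
        · omega
        · rw [List.getElem?_cons]
          rw [if_neg (by omega)]
          rw [List.getElem?_replicate, if_pos (by simp at hlt ⊢; omega)]
          rfl
      · rw [List.getElem?_eq_none (by omega)]
        rfl
  · have hlen1 : 0 < nums.length := List.length_pos_iff.mpr hne
    have ht0 : 0 ≤ target := by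
      rcases hp1 with h | h
      · exact absurd h hne
      · exact h
    by_cases ht : target ≤ 0
    · have htz : target = 0 := by omega
      subst htz
      rw [pvA_value_t0 nums hne, pvB_unfold, if_pos le_rfl]
    · push_neg at ht
      have hpos : ∀ x ∈ nums, 0 < x := by
        rcases hp2 with h | h
        · omega
        · exact h
      by_cases hn1 : nums.length = 1
      · obtain ⟨a, rfl⟩ := List.length_eq_one_iff.mp hn1
        have hapos : 0 < a := hpos a (List.mem_singleton_self a)
        have hD : ¬ (a ∣ target ∧ 2 * a ≤ target) := by
          intro hc
          exact hnd ⟨rfl, hapos, hc.1, hc.2⟩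
        by_cases hdvd : a ∣ target
        · have h2a : ¬ 2 * a ≤ target := fun hc => hD ⟨hdvd, hc⟩
          obtain ⟨t, htt⟩ := hdvd
          have ht1 : 1 ≤ t := by nlinarith [htt, hapos]
          have hta : t = 1 := by
            by_contra hcon
            have h2t : 2 ≤ t := by omega
            nlinarith [htt, mul_le_mul_of_nonneg_left h2t hapos.le]
          have hteq : target = a := by rw [htt, hta, mul_one]
          rw [pvA_value_one_eq a target (by omega) hapos hteq,
            pvB_one a target (by omega) hapos, if_pos ⟨t, htt⟩]
        · rw [pvA_value_one_nodvd a target (by omega) hapos hdvd,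
            pvB_one a target (by omega) hapos, if_neg hdvd]
      · have hn2 : 2 ≤ nums.length := by omega
        have h0 : (0 : Int) ∉ nums := fun hc => by have := hpos 0 hc; omega
        rw [pvA_value_ge2 nums target (by omega) hn2 h0, pvB_value nums target hpos (by omega)]

theorem backpack_iv_dp_changed : Claim_changed_backpack_iv_dp := by
  unfold Claim_changed_backpack_iv_dp; decide

theorem backpack_iv_dp_tight : Claim_exact_backpack_iv_dp := by
  intro nums target _ _ hd
  obtain ⟨hlen1, hhead, hdvd, h2a⟩ := hd
  obtain ⟨a, rfl⟩ := List.length_eq_one_iff.mp hlen1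
  have hha : ([a] : List Int).headI = a := rfl
  rw [hha] at hhead hdvd h2a
  have ht : 1 ≤ target := by omega
  have hA := pvA_value_one_ge2 a target ht hhead hdvd h2a
  have hB : backpack_iv_dp_alt [a] target = 1 := by
    rw [pvB_one a target ht hhead, if_pos hdvd]
  rw [hB]
  omega
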